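-- pv_equiv track=rewrite | github.com/tomilov-dev/DSA | algorithms/dynamic_programming/number_of_ways_for_triangulation_for_polygon.py | count
-- ===== SOURCE A (Python) =====
-- def count(n: int) -> int:
--     if n < 3:
--         return 0
--
--     dp = [0] * (n + 1)
--     dp[0] = 1
--     dp[1] = 1
--     for i in range(2, n + 1):
--         for j in range(0, i):
--             dp[i] += dp[j] * dp[i - j - 1]
--     return dp[n - 2]
-- ===== SOURCE B (Python) =====
-- def count(n: int) -> int:
--     if n < 3:
--         return 0
--     k = n - 2
--     r = 1
--     for i in range(1, k + 1):
--         r = r * (k + i) // i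
--     return r // (k + 1)
-- ===== Notes on version B (the rewrite author's own statement) =====
-- stated objective: faster
-- what changed: Replaces the O(n^2) Catalan convolution DP table with the closed-form C(2k,k)/(k+1) for k=n-2, computed by a single O(n) exact integer product loop.
import Mathlib
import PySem

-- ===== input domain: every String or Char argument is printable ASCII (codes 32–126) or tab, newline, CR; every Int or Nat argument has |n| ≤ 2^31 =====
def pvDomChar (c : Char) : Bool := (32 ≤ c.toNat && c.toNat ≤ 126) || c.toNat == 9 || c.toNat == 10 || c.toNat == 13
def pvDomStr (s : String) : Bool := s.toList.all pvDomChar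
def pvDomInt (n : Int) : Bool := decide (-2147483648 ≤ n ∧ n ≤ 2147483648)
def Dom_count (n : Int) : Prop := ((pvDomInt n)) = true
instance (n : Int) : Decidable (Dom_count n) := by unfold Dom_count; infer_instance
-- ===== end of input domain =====

-- ===== PORT A =====
-- B replaces A's O(n^2) Catalan convolution DP with the O(n) closed-form product
-- C(2k,k)/(k+1) for k = n-2 (objective: faster).
def count (n : Int) : Int :=
  if n < 3 then 0
  else
    let N := n.toNat
    let dp0 : List Int := ((List.replicate (N + 1) (0 : Int)).set 0 1).set 1 1
    let dp := (List.range' 2 (N - 1)).foldl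
      (fun dp i => (List.range i).foldl
        (fun d j => d.set i (d.getD i 0 + d.getD j 0 * d.getD (i - j - 1) 0)) dp) dp0
    dp.getD (N - 2) 0

-- ===== PORT B =====
def count_alt (n : Int) : Int :=
  if n < 3 then 0
  else
    let k := (n - 2).toNat
    let r := (List.range' 1 k).foldl
      (fun r (i : Nat) => PySem.Int.floordiv (r * ((k : Int) + (i : Int))) ((i : Int))) 1
    PySem.Int.floordiv r ((k : Int) + 1)

-- ===== PRECONDITION & SPEC =====
def Spec_count (n : Int) (out : Int) : Prop := out = count_alt n
instance (n : Int) (out : Int) : Decidable (Spec_count n out) := by unfold Spec_count; infer_instance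

-- ===== CLAIM (what is proved, stated in full; the proofs are below) =====
def Claim_equal_count : Prop := ∀ (n : Int), Dom_count n → Spec_count n (count n)

-- ===== LEMMAS AND PROOFS =====

-- getD through set
theorem getD_set_self (l : List Int) (i : Nat) (v : Int) (h : i < l.length) :
    (l.set i v).getD i 0 = v := by
  simp [List.getD_eq_getElem?_getD, h]

theorem getD_set_ne (l : List Int) (i j : Nat) (v : Int) (h : i ≠ j) :
    (l.set i v).getD j 0 = l.getD j 0 := by
  simp [List.getD_eq_getElem?_getD, List.getElem?_set_ne h]

theorem set_getD_self (l : List Int) (i : Nat) (h : i < l.length) :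
    l.set i (l.getD i 0) = l := by
  simp [List.getD_eq_getElem?_getD, List.getElem?_eq_getElem h, List.set_getElem_self]

-- B's product loop computes binomial coefficients: after m steps r = choose (k+m) m
theorem bfold (k : Nat) : ∀ (m : Nat),
    (List.range' 1 m).foldl
      (fun r (i : Nat) => PySem.Int.floordiv (r * ((k : Int) + (i : Int))) ((i : Int))) 1
    = (((k + m).choose m : Nat) : Int) := by
  intro m
  induction m with
  | zero => simp
  | succ m ih =>
    rw [show List.range' 1 (m+1) = List.range' 1 m ++ [1 + m] by
          simpa using List.range'_concat (s := 1) (n := m) (step := 1),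
        List.foldl_append, ih]
    have hc : (k + m).choose m * (k + (m + 1)) = (k + m + 1).choose (m + 1) * (m + 1) := by
      rw [show k + (m + 1) = (k + m) + 1 by omega, Nat.mul_comm]
      exact Nat.add_one_mul_choose_eq (k + m) m
    have : ((((k + m).choose m : Nat) : Int) * ((k : Int) + ((1 + m : Nat) : Int)))
        = (((k + m + 1).choose (m + 1) * (m + 1) : Nat) : Int) := by
      push_cast
      push_cast at hc
      linarith [hc]
    simp only [List.foldl_cons, List.foldl_nil, this]
    rw [show ((1 + m : Nat) : Int) = ((m + 1 : Nat) : Int) by push_cast; ring,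
        PySem.Int.floordiv_natCast]
    simp [show k + (m + 1) = k + m + 1 by omega]

-- A's inner loop adds the convolution sum at position i
theorem inner_fold (dp : List Int) (i : Nat) (hi : i < dp.length) :
    ∀ (m : Nat), m ≤ i → ∀ (v : Int),
    (List.range m).foldl
      (fun d j => d.set i (d.getD i 0 + d.getD j 0 * d.getD (i - j - 1) 0)) (dp.set i v)
    = dp.set i (v + ∑ j ∈ Finset.range m, dp.getD j 0 * dp.getD (i - j - 1) 0) := by
  intro m
  induction m with
  | zero => intro _ v; simp
  | succ m ih =>
    intro hm v
    have hmi : m < i := hm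
    rw [List.range_succ, List.foldl_append, ih (by omega) v]
    simp only [List.foldl_cons, List.foldl_nil]
    rw [List.set_set,
        getD_set_self dp i _ hi,
        getD_set_ne dp i m _ (by omega),
        getD_set_ne dp i (i - m - 1) _ (by omega),
        Finset.sum_range_succ]
    ring_nf

-- invariant of A's outer loop
def DPInv (N : Nat) (dp : List Int) (i : Nat) : Prop :=
  dp.length = N + 1 ∧ (∀ j, j < i → dp.getD j 0 = ((catalan j : Nat) : Int))
    ∧ (∀ m, i ≤ m → dp.getD m 0 = 0)

theorem outer_fold (N : Nat) (hN : 3 ≤ N) : ∀ (t : Nat), t ≤ N - 1 →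
    DPInv N ((List.range' 2 t).foldl
      (fun dp i => (List.range i).foldl
        (fun d j => d.set i (d.getD i 0 + d.getD j 0 * d.getD (i - j - 1) 0)) dp)
      (((List.replicate (N + 1) (0 : Int)).set 0 1).set 1 1)) (2 + t) := by
  intro t
  induction t with
  | zero =>
    intro _
    rw [show List.range' 2 0 = [] from rfl]
    simp only [List.foldl_nil]
    refine ⟨by simp, ?_, ?_⟩
    · intro j hj
      interval_cases j
      · rw [getD_set_ne _ 1 0 _ (by omega), getD_set_self _ 0 _ (by simp only [List.length_set, List.length_replicate]; omega)]
        simp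
      · rw [getD_set_self _ 1 _ (by simp only [List.length_set, List.length_replicate]; omega)]
        simp [catalan_one]
    · intro m hm
      by_cases hml : m < N + 1
      · rw [getD_set_ne _ 1 m _ (by omega), getD_set_ne _ 0 m _ (by omega),
            List.getD_eq_getElem?_getD]
        simp [hml]
      · rw [List.getD_eq_getElem?_getD, List.getElem?_eq_none (by simp only [List.length_set, List.length_replicate]; omega)]
        rfl
  | succ t ih =>
    intro ht
    have inv := ih (by omega)
    set dp := (List.range' 2 t).foldl
      (fun dp i => (List.range i).foldl
        (fun d j => d.set i (d.getD i 0 + d.getD j 0 * d.getD (i - j - 1) 0)) dp)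
      (((List.replicate (N + 1) (0 : Int)).set 0 1).set 1 1) with hdp
    obtain ⟨hlen, hcat, hzero⟩ := inv
    rw [show List.range' 2 (t+1) = List.range' 2 t ++ [2 + t] by
          simpa using List.range'_concat (s := 2) (n := t) (step := 1),
        List.foldl_append, ← hdp]
    simp only [List.foldl_cons, List.foldl_nil]
    have hilen : 2 + t < dp.length := by omega
    have hstep : (List.range (2 + t)).foldl
        (fun d j => d.set (2+t) (d.getD (2+t) 0 + d.getD j 0 * d.getD (2+t - j - 1) 0)) dp
        = dp.set (2+t) (0 + ∑ j ∈ Finset.range (2+t),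
            dp.getD j 0 * dp.getD (2+t - j - 1) 0) := by
      conv_lhs => rw [← set_getD_self dp (2+t) hilen]
      rw [inner_fold dp (2+t) hilen (2+t) (le_refl _) (dp.getD (2+t) 0),
          hzero (2+t) (le_refl _)]
    rw [hstep]
    have hsum : (∑ j ∈ Finset.range (2+t), dp.getD j 0 * dp.getD (2+t - j - 1) 0)
        = ((catalan (2 + t) : Nat) : Int) := by
      have hrw : ∀ j ∈ Finset.range (2+t),
          dp.getD j 0 * dp.getD (2+t - j - 1) 0
          = ((catalan j * catalan (1 + t - j) : Nat) : Int) := by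
        intro j hj
        rw [Finset.mem_range] at hj
        rw [hcat j hj, hcat (2+t-j-1) (by omega), show 2+t-j-1 = 1+t-j by omega]
        push_cast; ring
      rw [Finset.sum_congr rfl hrw]
      have := catalan_succ (1 + t)
      rw [Fin.sum_univ_eq_sum_range (fun i => catalan i * catalan (1 + t - i)) (1+t+1)] at this
      rw [show 2 + t = 1 + t + 1 by omega, this]
      push_cast
      rfl
    refine ⟨by simp [hlen], ?_, ?_⟩
    · intro j hj
      by_cases hje : j = 2 + t
      · subst hje
        rw [getD_set_self _ _ _ hilen, hsum]; ring
      · rw [getD_set_ne _ _ _ _ (by omega)]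
        exact hcat j (by omega)
    · intro m hm
      rw [getD_set_ne _ _ _ _ (by omega)]
      exact hzero m (by omega)

-- ===== VERDICT (by name: the statement is the Claim_ definition above) =====
theorem count_spec : Claim_equal_count := by
  intro n _
  unfold Spec_count count count_alt
  by_cases h3 : n < 3
  · simp [h3]
  · simp only [h3, if_false]
    have hN3 : 3 ≤ n.toNat := by omega
    set N := n.toNat with hNdef
    -- A's side: the DP table holds Catalan numbers
    have hout := outer_fold N hN3 (N - 1) (le_refl _)
    obtain ⟨hlen, hcat, -⟩ := hout
    have hA := hcat (N - 2) (by omega)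
    -- B's side: the product loop is the central binomial coefficient
    have hk : (n - 2).toNat = N - 2 := by omega
    rw [hk, bfold (N - 2) (N - 2)]
    have hcb : (N - 2) + (N - 2) = 2 * (N - 2) := by omega
    rw [show (((N-2 : Nat) : Int) + 1) = (((N - 2) + 1 : Nat) : Int) by push_cast; ring,
        hcb, PySem.Int.floordiv_natCast]
    rw [show (2 * (N - 2)).choose (N - 2) = (N - 2).centralBinom from rfl,
        ← catalan_eq_centralBinom_div (N - 2)]
    simpa using hA
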